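-- pv_equiv track=rewrite | github.com/chaeminsoo/coding_test | 100000000_mul.py | solution
-- ===== SOURCE A (Python) =====
-- def solution(e, starts):
--     # dp[n] : n의 약수의 개수
--     dp = [0]*(e+1)
--     for i in range(1,e+1):
--         if i*i <= e:
--             dp[i*i] += 1
--         for j in range(i+1,e+1):
--             ref = i*j
--             if ref > e:
--                 break
--             dp[ref] += 2
--
--     # dp_2[n] : n에서부터 e(문제에서 주어진것) 사이의 가장 약수가 많은 수
--     dp_2 = [0]*(e+1)
--     dp_2[e] = e
--     for i in range(e-1,-1,-1):
--         if dp[i] >= dp[dp_2[i+1]]: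
--             dp_2[i] = i
--         else:
--             dp_2[i] = dp_2[i+1]
--
--     ans = []
--     for i in starts:
--         ans.append(dp_2[i])
--     return ans
-- ===== SOURCE B (Python) =====
-- def solution(e, starts):
--     # divisor counts via the standard multiples sieve (no perfect-square special case)
--     dp = [0] * (e + 1)
--     for d in range(1, e + 1):
--         for m in range(d, e + 1, d):
--             dp[m] += 1
--     # suffix argmax (leftmost maximum) built back-to-front with an accumulator, then reversed
--     best = e
--     suf = [best]
--     for i in range(e - 1, -1, -1):
--         if dp[i] >= dp[best]:
--             best = i
--         suf.append(best)
--     suf.reverse()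
--     return [suf[s] for s in starts]
-- ===== Notes on version B (the rewrite author's own statement) =====
-- stated objective: simpler
-- what changed: The divisor-pairing sieve with its perfect-square special case and break is replaced by the standard multiples sieve (for d, bump every multiple of d), and the suffix-argmax pass is rebuilt as an accumulator list appended back-to-front and reversed, with a comprehension answering the queries.
import Mathlib
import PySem

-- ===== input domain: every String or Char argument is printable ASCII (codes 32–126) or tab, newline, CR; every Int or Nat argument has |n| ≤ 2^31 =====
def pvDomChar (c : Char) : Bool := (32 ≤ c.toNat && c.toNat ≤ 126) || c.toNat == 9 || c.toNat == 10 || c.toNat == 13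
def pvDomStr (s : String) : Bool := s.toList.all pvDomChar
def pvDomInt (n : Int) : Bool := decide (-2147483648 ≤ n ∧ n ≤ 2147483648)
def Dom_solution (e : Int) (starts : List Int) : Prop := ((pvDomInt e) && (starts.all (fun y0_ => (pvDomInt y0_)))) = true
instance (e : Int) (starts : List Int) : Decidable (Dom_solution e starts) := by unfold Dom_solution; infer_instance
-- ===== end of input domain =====

-- B replaces A's divisor-pairing sieve (square special case + break) by the plain multiples
-- sieve and rebuilds the suffix-argmax pass as an accumulator list that is reversed at the end;
-- objective: a simpler, more standard formulation of the same computation.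

-- ===== PORT A =====
-- inner 'for j in range(i+1, e+1): ref = i*j; if ref > e: break; dp[ref] += 2'
def innerA (e i : Int) (js : List Int) (dp : List Int) : List Int :=
  match js with
  | [] => dp
  | j :: rest =>
    if e < i * j then dp
    else innerA e i rest (PySem.List.pySetD dp (i*j) (PySem.List.pyGetD dp (i*j) 0 + 2))

-- body of 'for i in range(1, e+1)': square update, then the inner j-loop
def phase1StepA (e : Int) (dp : List Int) (i : Int) : List Int :=
  innerA e i (PySem.List.pyRange (i+1) (e+1) 1)
    (if i*i ≤ e then PySem.List.pySetD dp (i*i) (PySem.List.pyGetD dp (i*i) 0 + 1) else dp)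

-- body of 'for i in range(e-1, -1, -1)'
def phase2StepA (dp : List Int) (d2 : List Int) (i : Int) : List Int :=
  if PySem.List.pyGetD dp i 0 ≥ PySem.List.pyGetD dp (PySem.List.pyGetD d2 (i+1) 0) 0
  then PySem.List.pySetD d2 i i
  else PySem.List.pySetD d2 i (PySem.List.pyGetD d2 (i+1) 0)

def solution (e : Int) (starts : List Int) : List Int :=
  let dp := (PySem.List.pyRange 1 (e+1) 1).foldl (phase1StepA e)
    (PySem.List.pyRepeat [(0:Int)] (e+1))
  let d2 := (PySem.List.pyRange (e-1) (-1) (-1)).foldl (phase2StepA dp)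
    (PySem.List.pySetD (PySem.List.pyRepeat [(0:Int)] (e+1)) e e)
  starts.foldl (fun ans s => ans ++ [PySem.List.pyGetD d2 s 0]) []

-- ===== PORT B =====
-- body of 'for d in range(1, e+1)': bump every multiple of d
def sieveStepB (e : Int) (dp : List Int) (d : Int) : List Int :=
  (PySem.List.pyRange d (e+1) d).foldl (fun dp m =>
    PySem.List.pySetD dp m (PySem.List.pyGetD dp m 0 + 1)) dp

-- body of 'for i in range(e-1, -1, -1)': running best and the appended suffix list
def sufStepB (dp : List Int) (p : Int × List Int) (i : Int) : Int × List Int :=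
  let best := if PySem.List.pyGetD dp i 0 ≥ PySem.List.pyGetD dp p.1 0 then i else p.1
  (best, p.2 ++ [best])

def solution_alt (e : Int) (starts : List Int) : List Int :=
  let dp := (PySem.List.pyRange 1 (e+1) 1).foldl (sieveStepB e)
    (PySem.List.pyRepeat [(0:Int)] (e+1))
  let p := (PySem.List.pyRange (e-1) (-1) (-1)).foldl (sufStepB dp) (e, [e])
  starts.map (fun s => PySem.List.pyGetD p.2.reverse s 0)

-- ===== PRECONDITION & SPEC =====
-- Pre_ excludes exactly the inputs where the Python A raises IndexError:
-- a negative e (dp_2[e] is out of range) and any start outside [-(e+1), e] (dp_2[i] is out of range).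
def Pre_solution (e : Int) (starts : List Int) : Prop :=
  0 ≤ e ∧ ∀ s ∈ starts, -(e+1) ≤ s ∧ s ≤ e
instance (e : Int) (starts : List Int) : Decidable (Pre_solution e starts) := by
  unfold Pre_solution; infer_instance
def pvWitness_solution : Int × List Int := (10, [3, 5, -2, 0, 10])

def Spec_solution (e : Int) (starts : List Int) (out : List Int) : Prop := out = solution_alt e starts
instance (e : Int) (starts : List Int) (out : List Int) : Decidable (Spec_solution e starts out) := by unfold Spec_solution; infer_instance

-- ===== CLAIM (what is proved, stated in full; the proofs are below) =====
def Claim_equal_solution : Prop := ∀ (e : Int) (starts : List Int), Dom_solution e starts → Pre_solution e starts → Spec_solution e starts (solution e starts)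

-- ===== LEMMAS AND PROOFS =====

-- one increment step 'dp[p] += c', and the total increment a list of (position, amount) pairs puts at n
def incr (dp : List Int) (p : Int × Int) : List Int :=
  PySem.List.pySetD dp p.1 (PySem.List.pyGetD dp p.1 0 + p.2)

def sumAt (L : List (Int × Int)) (n : Nat) : Int :=
  ((L.filter (fun p => p.1 == (n:Int))).map (·.2)).sum

lemma length_foldl_incr (L : List (Int × Int)) (dp : List Int) :
    (L.foldl incr dp).length = dp.length := by
  induction L generalizing dp with
  | nil => rfl
  | cons p L ih => simp only [List.foldl_cons]; rw [ih]; simp [incr, PySem.List.length_pySetD]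

lemma getD_incr (dp : List Int) (q : Int × Int) (h0 : 0 ≤ q.1) (h1 : q.1 < (dp.length : Int))
    (n : Nat) :
    (incr dp q).getD n 0 = dp.getD n 0 + (if q.1 == (n : Int) then q.2 else 0) := by
  have ht : q.1.toNat < dp.length := by omega
  rw [incr, PySem.List.pySetD_of_nonneg _ _ h0, PySem.List.pyGetD_eq_getElem _ 0 h0 h1]
  rw [List.getD_eq_getElem?_getD, List.getD_eq_getElem?_getD]
  by_cases hq : q.1.toNat = n
  · subst hq
    rw [List.getElem?_set_self ht, List.getElem?_eq_getElem ht]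
    have hb : (q.1 == ((q.1.toNat : Nat) : Int)) = true := by simp; omega
    rw [hb]; simp
  · rw [List.getElem?_set_ne hq]
    have hb : (q.1 == ((n : Nat) : Int)) = false := by simp; omega
    rw [hb]; simp

lemma sumAt_cons (q : Int × Int) (L : List (Int × Int)) (n : Nat) :
    sumAt (q :: L) n = (if q.1 == (n : Int) then q.2 else 0) + sumAt L n := by
  simp only [sumAt, List.filter_cons]
  by_cases h : q.1 == (n : Int)
  · rw [if_pos h, if_pos h]; simp
  · rw [if_neg (by simpa using h), if_neg h]; simp

lemma sumAt_append (L1 L2 : List (Int × Int)) (n : Nat) :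
    sumAt (L1 ++ L2) n = sumAt L1 n + sumAt L2 n := by
  simp [sumAt, List.filter_append]

lemma sumAt_flatMap (l : List Int) (f : Int → List (Int × Int)) (n : Nat) :
    sumAt (l.flatMap f) n = (l.map (fun i => sumAt (f i) n)).sum := by
  induction l with
  | nil => simp [sumAt]
  | cons a l ih => simp only [List.flatMap_cons, sumAt_append, ih, List.map_cons, List.sum_cons]

lemma getD_foldl_incr (L : List (Int × Int)) (dp : List Int)
    (h : ∀ p ∈ L, 0 ≤ p.1 ∧ p.1 < (dp.length : Int)) (n : Nat) :
    (L.foldl incr dp).getD n 0 = dp.getD n 0 + sumAt L n := by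
  induction L generalizing dp with
  | nil => simp [sumAt]
  | cons q L ih =>
    have hq := h q (List.mem_cons_self ..)
    have hlen : (incr dp q).length = dp.length := by simp [incr, PySem.List.length_pySetD]
    rw [List.foldl_cons, ih (incr dp q)
        (fun p hp => by rw [hlen]; exact h p (List.mem_cons_of_mem _ hp)),
      getD_incr dp q hq.1 hq.2 n, sumAt_cons]
    ring

-- A's increment pairs and B's increment pairs
def pairsA (e : Int) : List (Int × Int) :=
  (PySem.List.pyRange 1 (e+1) 1).flatMap (fun i =>
    (if i*i ≤ e then [(i*i, (1:Int))] else [])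
      ++ ((PySem.List.pyRange (i+1) (e+1) 1).takeWhile (fun j => !decide (e < i*j))).map
           (fun j => (i*j, (2:Int))))

def pairsB (e : Int) : List (Int × Int) :=
  (PySem.List.pyRange 1 (e+1) 1).flatMap (fun d =>
    (PySem.List.pyRange d (e+1) d).map (fun m => (m, (1:Int))))

lemma innerA_eq_foldl (e i : Int) (js : List Int) (dp : List Int) :
    innerA e i js dp
      = ((js.takeWhile (fun j => !decide (e < i*j))).map (fun j => (i*j, (2:Int)))).foldl incr dp := by
  induction js generalizing dp with
  | nil => rfl
  | cons j rest ih =>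
    rw [innerA]
    by_cases h : e < i * j
    · rw [if_pos h]; simp [h]
    · rw [if_neg h, ih]
      simp only [List.takeWhile_cons, h, decide_false, Bool.not_false, if_pos,
        List.map_cons, List.foldl_cons]
      rfl

lemma phase1A_eq (e : Int) (dp0 : List Int) :
    (PySem.List.pyRange 1 (e+1) 1).foldl (phase1StepA e) dp0 = (pairsA e).foldl incr dp0 := by
  rw [pairsA, List.foldl_flatMap]
  apply PySem.List.foldl_congr_mem
  intro dp i _
  rw [phase1StepA, List.foldl_append, innerA_eq_foldl]
  by_cases h : i*i ≤ e
  · rw [if_pos h, if_pos h]; rfl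
  · rw [if_neg h, if_neg h]; rfl

lemma phase1B_eq (e : Int) (dp0 : List Int) :
    (PySem.List.pyRange 1 (e+1) 1).foldl (sieveStepB e) dp0 = (pairsB e).foldl incr dp0 := by
  rw [pairsB, List.foldl_flatMap]
  apply PySem.List.foldl_congr_mem
  intro dp d _
  rw [sieveStepB, List.foldl_map]
  rfl

lemma pairsA_bounds (e : Int) : ∀ p ∈ pairsA e, 1 ≤ p.1 ∧ p.1 ≤ e := by
  intro p hp
  rw [pairsA, List.mem_flatMap] at hp
  obtain ⟨i, hi, hp⟩ := hp
  obtain ⟨hi1, hi2⟩ := PySem.List.mem_pyRange_one.1 hi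
  rcases List.mem_append.1 hp with hsq | hpr
  · by_cases hc : i*i ≤ e
    · rw [if_pos hc] at hsq
      simp only [List.mem_singleton] at hsq
      subst hsq
      constructor
      · nlinarith
      · exact hc
    · rw [if_neg hc] at hsq; simp at hsq
  · rw [List.mem_map] at hpr
    obtain ⟨j, hj, rfl⟩ := hpr
    have hple := List.mem_takeWhile_imp hj
    have hjm : j ∈ PySem.List.pyRange (i+1) (e+1) 1 :=
      (List.takeWhile_sublist _).mem hj
    obtain ⟨hj1, hj2⟩ := PySem.List.mem_pyRange_one.1 hjm
    simp only [Bool.not_eq_true', decide_eq_false_iff_not, not_lt] at hple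
    constructor
    · simp only; nlinarith
    · simpa using hple

lemma pairsB_bounds (e : Int) : ∀ p ∈ pairsB e, 1 ≤ p.1 ∧ p.1 ≤ e := by
  intro p hp
  rw [pairsB, List.mem_flatMap] at hp
  obtain ⟨d, hd, hp⟩ := hp
  obtain ⟨hd1, hd2⟩ := PySem.List.mem_pyRange_one.1 hd
  rw [List.mem_map] at hp
  obtain ⟨m, hm, rfl⟩ := hp
  obtain ⟨hm1, hm2, -⟩ := (PySem.List.mem_pyRange_iff_of_pos (by omega) m).1 hm
  exact ⟨by simp only; omega, by simp only; omega⟩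

lemma sumAt_zero_of_pos (L : List (Int × Int)) (h : ∀ p ∈ L, 1 ≤ p.1) : sumAt L 0 = 0 := by
  have hf : L.filter (fun p => p.1 == ((0:Nat) : Int)) = [] := by
    rw [List.filter_eq_nil_iff]
    intro p hp
    have := h p hp
    simp only [Nat.cast_zero, beq_iff_eq]
    omega
  rw [sumAt, hf]; rfl

lemma takeWhile_eq_filter_pyRange (p : Int → Bool)
    (hp : ∀ x y : Int, x ≤ y → p y = true → p x = true) :
    ∀ (n : Nat) (a b : Int), (b - a).toNat = n →
      (PySem.List.pyRange a b 1).takeWhile p = (PySem.List.pyRange a b 1).filter p := by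
  intro n
  induction n with
  | zero =>
    intro a b hab
    rw [PySem.List.pyRange_one_eq_nil (by omega)]
    simp
  | succ n ih =>
    intro a b hab
    rw [PySem.List.pyRange_one_cons (by omega)]
    by_cases hpa : p a = true
    · rw [List.takeWhile_cons, List.filter_cons, if_pos hpa, hpa, if_pos rfl]
      rw [ih (a+1) b (by omega)]
    · have hpa' : p a = false := by simpa using hpa
      rw [List.takeWhile_cons, List.filter_cons, hpa']
      simp only [Bool.false_eq_true, if_false]
      symm
      rw [List.filter_eq_nil_iff]
      intro x hx
      obtain ⟨hx1, -⟩ := PySem.List.mem_pyRange_one.1 hx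
      intro hpx
      rw [hp a x (by omega) hpx] at hpa'
      simp at hpa'

lemma sumAt_map_pair (ms : List Int) (c : Int) (n : Nat) :
    sumAt (ms.map (fun m => (m, c))) n = c * (ms.count ((n:Nat) : Int)) := by
  rw [sumAt, List.filter_map]
  rw [List.map_map]
  have h2 : ((fun x : Int × Int => x.2) ∘ fun m : Int => (m, c)) = fun _ : Int => c := rfl
  have h1 : ((fun p : Int × Int => p.1 == ((n:Nat):Int)) ∘ fun m : Int => (m, c))
      = fun m : Int => m == ((n:Nat):Int) := rfl
  rw [h2, h1, PySem.List.sum_map_const_int]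
  rw [List.count, List.countP_eq_length_filter]
  ring

lemma count_pyRange_pos (a b s x : Int) (hs : 0 < s) :
    (PySem.List.pyRange a b s).count x = if a ≤ x ∧ x < b ∧ s ∣ x - a then 1 else 0 := by
  have hnd : (PySem.List.pyRange a b s).Nodup := by
    rw [PySem.List.pyRange_of_pos a b hs]
    refine List.Nodup.map ?_ (List.nodup_range)
    intro k1 k2 hk
    simp only at hk
    have h2 : s * (k1:Int) = s * (k2:Int) := by linarith
    have h3 := mul_left_cancel₀ (by omega : s ≠ 0) h2
    exact_mod_cast h3
  by_cases hm : x ∈ PySem.List.pyRange a b s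
  · rw [List.count_eq_one_of_mem hnd hm, if_pos ((PySem.List.mem_pyRange_iff_of_pos hs x).1 hm)]
  · rw [List.count_eq_zero.2 hm,
      if_neg (fun hc => hm ((PySem.List.mem_pyRange_iff_of_pos hs x).2 hc))]

lemma countP_range_card (N : Nat) (p : Nat → Bool) :
    List.countP p (List.range N) = ((Finset.range N).filter (fun k => p k = true)).card := by
  rw [List.countP_eq_length_filter,
    ← List.toFinset_card_of_nodup ((List.nodup_range).filter p),
    List.toFinset_filter, List.toFinset_range]

lemma card_shift (N : Nat) (P : Nat → Prop) [DecidablePred P] :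
    ((Finset.range N).filter (fun k => P (1+k))).card = ((Finset.Icc 1 N).filter P).card := by
  apply Finset.card_nbij' (fun k => 1+k) (fun d => d-1)
  · intro x hx
    simp only [Finset.coe_filter, Finset.mem_range, Set.mem_setOf_eq, Finset.mem_Icc] at hx ⊢
    exact ⟨⟨by omega, by omega⟩, hx.2⟩
  · intro x hx
    simp only [Finset.coe_filter, Finset.mem_range, Set.mem_setOf_eq, Finset.mem_Icc] at hx ⊢
    obtain ⟨⟨hx1, hx2⟩, hxP⟩ := hx
    refine ⟨by omega, ?_⟩
    have h12 : 1 + (x - 1) = x := by omega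
    rw [h12]; exact hxP
  · intro x hx
    show 1 + x - 1 = x
    omega
  · intro x hx
    simp only [Finset.coe_filter, Finset.mem_Icc, Set.mem_setOf_eq] at hx
    show 1 + (x - 1) = x
    omega

lemma sum_ite_range_card (N : Nat) (P : Int → Prop) [DecidablePred P] (Q : Nat → Prop)
    [DecidablePred Q] (hPQ : ∀ d : Nat, 1 ≤ d → d ≤ N → (P (d:Int) ↔ Q d)) :
    ((List.range N).map (fun k : Nat => if P ((1:Int) + (k:Int)) then (1:Int) else 0)).sum
      = (((Finset.Icc 1 N).filter Q).card : Int) := by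
  have hcong : ∀ k ∈ List.range N,
      (if P ((1:Int) + (k:Int)) then (1:Int) else 0)
        = if (decide (Q (1+k)) = true) then (1:Int) else 0 := by
    intro k hk
    have hk' : k < N := List.mem_range.1 hk
    have hcast : ((1:Int) + (k:Int)) = (((1+k : Nat)) : Int) := by push_cast; ring
    rw [hcast]
    exact if_congr ((hPQ (1+k) (by omega) (by omega)).trans (decide_eq_true_iff).symm) rfl rfl
  rw [List.map_congr_left hcong, PySem.List.sum_map_ite_one_zero,
    countP_range_card N (fun k => decide (Q (1+k)))]
  have hcards : ((Finset.range N).filter (fun k => decide (Q (1+k)) = true))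
      = ((Finset.range N).filter (fun k => Q (1+k))) := by
    apply Finset.filter_congr
    intro k _
    simp
  rw [hcards, card_shift]

-- the combinatorial core: pairing divisors d ↦ n/d
lemma key_card (N n : Nat) (h1 : 1 ≤ n) (h2 : n ≤ N) :
    ((Finset.Icc 1 N).filter (fun d => d ∣ n)).card
      = ((Finset.Icc 1 N).filter (fun i => i * i = n)).card
        + 2 * ((Finset.Icc 1 N).filter (fun i => i ∣ n ∧ i * i < n)).card := by
  have hsplit1 := Finset.card_filter_add_card_filter_not
    (s := (Finset.Icc 1 N).filter (fun d => d ∣ n)) (p := fun i => i * i < n)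
  have hsplit2 := Finset.card_filter_add_card_filter_not
    (s := ((Finset.Icc 1 N).filter (fun d => d ∣ n)).filter (fun i => ¬ i * i < n))
    (p := fun i => i * i = n)
  have hS2 : (((Finset.Icc 1 N).filter (fun d => d ∣ n)).filter (fun i => ¬ i * i < n)).filter
      (fun i => i * i = n) = (Finset.Icc 1 N).filter (fun i => i * i = n) := by
    ext i
    simp only [Finset.mem_filter, Finset.mem_Icc]
    constructor
    · rintro ⟨⟨⟨hi, hd⟩, -⟩, he⟩; exact ⟨hi, he⟩
    · rintro ⟨hi, he⟩
      exact ⟨⟨⟨hi, Dvd.intro i he⟩, by omega⟩, he⟩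
  have hS1 : ((Finset.Icc 1 N).filter (fun d => d ∣ n)).filter (fun i => i * i < n)
      = (Finset.Icc 1 N).filter (fun i => i ∣ n ∧ i * i < n) := by
    ext i
    simp only [Finset.mem_filter, Finset.mem_Icc]
    tauto
  have hbij : ((((Finset.Icc 1 N).filter (fun d => d ∣ n)).filter (fun i => ¬ i * i < n)).filter
      (fun i => ¬ i * i = n)).card
      = (((Finset.Icc 1 N).filter (fun d => d ∣ n)).filter (fun i => i * i < n)).card := by
    apply Finset.card_nbij' (fun d => n / d) (fun d => n / d)
    · intro x hx
      simp only [Finset.coe_filter, Finset.mem_filter, Finset.mem_Icc, Set.mem_setOf_eq] at hx ⊢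
      obtain ⟨⟨⟨⟨hx1, hxN⟩, hxd⟩, hge⟩, hne⟩ := hx
      have hx0 : 0 < x := by omega
      have hxn : x ≤ n := Nat.le_of_dvd (by omega) hxd
      have hq : x * (n / x) = n := Nat.mul_div_cancel' hxd
      have hqd : n / x ∣ n := Nat.div_dvd_of_dvd hxd
      have hq0 : 0 < n / x := by
        rcases Nat.eq_zero_or_pos (n / x) with h | h
        · rw [h, Nat.mul_zero] at hq; omega
        · exact h
      have hnlt : n < x * x := by omega
      have hmul : x * (n / x) < x * x := by rw [hq]; exact hnlt
      have hlt : n / x < x := lt_of_mul_lt_mul_left hmul (by omega)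
      have hcc : (n / x) * (n / x) < n := by
        calc (n / x) * (n / x) < x * (n / x) := by
              exact Nat.mul_lt_mul_of_lt_of_le hlt (le_refl _) (by omega)
          _ = n := hq
      exact ⟨⟨⟨by omega, by omega⟩, hqd⟩, hcc⟩
    · intro x hx
      simp only [Finset.coe_filter, Finset.mem_filter, Finset.mem_Icc, Set.mem_setOf_eq] at hx ⊢
      obtain ⟨⟨⟨hx1, hxN⟩, hxd⟩, hlt⟩ := hx
      have hx0 : 0 < x := by omega
      have hq : x * (n / x) = n := Nat.mul_div_cancel' hxd
      have hqd : n / x ∣ n := Nat.div_dvd_of_dvd hxd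
      have hq0 : 0 < n / x := by
        rcases Nat.eq_zero_or_pos (n / x) with h | h
        · rw [h, Nat.mul_zero] at hq; omega
        · exact h
      have hmul : x * x < x * (n / x) := by rw [hq]; exact hlt
      have hgt : x < n / x := lt_of_mul_lt_mul_left hmul (by omega)
      have hcc : n < (n / x) * (n / x) := by
        calc n = x * (n / x) := hq.symm
          _ < (n / x) * (n / x) := by
              exact Nat.mul_lt_mul_of_lt_of_le hgt (le_refl _) (by omega)
      have hle : n / x ≤ n := Nat.div_le_self n x
      refine ⟨⟨⟨⟨by omega, by omega⟩, hqd⟩, ?_⟩, ?_⟩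
      · show ¬ (n / x) * (n / x) < n
        omega
      · show ¬ (n / x) * (n / x) = n
        omega
    · intro x hx
      simp only [Finset.coe_filter, Finset.mem_filter, Finset.mem_Icc, Set.mem_setOf_eq] at hx
      obtain ⟨⟨⟨⟨hx1, hxN⟩, hxd⟩, -⟩, -⟩ := hx
      show n / (n / x) = x
      exact Nat.div_div_self hxd (by omega)
    · intro x hx
      simp only [Finset.coe_filter, Finset.mem_filter, Finset.mem_Icc, Set.mem_setOf_eq] at hx
      obtain ⟨⟨⟨hx1, hxN⟩, hxd⟩, -⟩ := hx
      show n / (n / x) = x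
      exact Nat.div_div_self hxd (by omega)
  rw [hS1] at hsplit1
  rw [hS2] at hsplit2
  rw [hS1] at hbij
  omega

lemma sumAt_B (e : Int) (he : 0 ≤ e) (n : Nat) (hn : n ≤ e.toNat) :
    sumAt (pairsB e) n = (((Finset.Icc 1 e.toNat).filter (fun d => d ∣ n ∧ 1 ≤ n)).card : Int) := by
  rw [pairsB, sumAt_flatMap]
  have h1 : ∀ d ∈ PySem.List.pyRange 1 (e+1) 1,
      sumAt ((PySem.List.pyRange d (e+1) d).map (fun m => (m, (1:Int)))) n
        = if d ≤ ((n:Nat):Int) ∧ ((n:Nat):Int) < e+1 ∧ d ∣ ((n:Nat):Int) - d then (1:Int) else 0 := by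
    intro d hd
    obtain ⟨hd1, -⟩ := PySem.List.mem_pyRange_one.1 hd
    rw [sumAt_map_pair, count_pyRange_pos _ _ _ _ (by omega), one_mul]
    split_ifs <;> simp
  rw [List.map_congr_left h1, PySem.List.pyRange_one]
  have he1 : (e + 1 - 1).toNat = e.toNat := by omega
  rw [he1, List.map_map]
  exact sum_ite_range_card e.toNat
    (fun d => d ≤ ((n:Nat):Int) ∧ ((n:Nat):Int) < e+1 ∧ d ∣ ((n:Nat):Int) - d)
    (fun d => d ∣ n ∧ 1 ≤ n)
    (by
      intro d hd1 hdN
      constructor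
      · rintro ⟨hdn, -, hdvd⟩
        have hdvd2 : (d:Int) ∣ ((n:Nat):Int) := by
          have hadd := dvd_add hdvd (dvd_refl (d:Int))
          simpa using hadd
        exact ⟨Int.natCast_dvd_natCast.mp hdvd2, by omega⟩
      · rintro ⟨hdvd, hn1⟩
        have hdn : d ≤ n := Nat.le_of_dvd (by omega) hdvd
        refine ⟨by omega, by omega, ?_⟩
        exact dvd_sub (Int.natCast_dvd_natCast.mpr hdvd) dvd_rfl)

lemma sumAt_A (e : Int) (he : 0 ≤ e) (n : Nat) (hn : n ≤ e.toNat) :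
    sumAt (pairsA e) n
      = (((Finset.Icc 1 e.toNat).filter (fun i => i * i = n)).card : Int)
        + 2 * (((Finset.Icc 1 e.toNat).filter (fun i => i ∣ n ∧ i * i < n)).card : Int) := by
  rw [pairsA, sumAt_flatMap]
  have hbody : ∀ i ∈ PySem.List.pyRange 1 (e+1) 1,
      sumAt ((if i*i ≤ e then [(i*i, (1:Int))] else [])
        ++ ((PySem.List.pyRange (i+1) (e+1) 1).takeWhile (fun j => !decide (e < i*j))).map
             (fun j => (i*j, (2:Int)))) n
      = (if i*i = ((n:Nat):Int) then (1:Int) else 0)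
        + 2 * (if i ∣ ((n:Nat):Int) ∧ i*i < ((n:Nat):Int) then (1:Int) else 0) := by
    intro i hi
    obtain ⟨hi1, hi2⟩ := PySem.List.mem_pyRange_one.1 hi
    rw [sumAt_append]
    have hsq : sumAt (if i*i ≤ e then [(i*i, (1:Int))] else []) n
        = (if i*i = ((n:Nat):Int) then (1:Int) else 0) := by
      by_cases hc : i*i ≤ e
      · rw [if_pos hc, sumAt_cons]
        simp only [sumAt, List.filter_nil, List.map_nil, List.sum_nil, add_zero]
        by_cases hb : i*i = ((n:Nat):Int)
        · rw [if_pos (by simpa using hb), if_pos hb]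
        · rw [if_neg (by simpa using hb), if_neg hb]
      · rw [if_neg hc]
        have hne : i*i ≠ ((n:Nat):Int) := by omega
        rw [if_neg hne]
        simp [sumAt]
    rw [hsq]
    congr 1
    rw [takeWhile_eq_filter_pyRange (fun j => !decide (e < i*j))
      (fun x y hxy hy => by
        simp only [Bool.not_eq_true', decide_eq_false_iff_not, not_lt] at hy ⊢
        nlinarith) (e + 1 - (i+1)).toNat (i+1) (e+1) rfl]
    rw [show (((PySem.List.pyRange (i+1) (e+1) 1).filter (fun j => !decide (e < i*j))).map
          (fun j => (i*j, (2:Int))))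
        = ((((PySem.List.pyRange (i+1) (e+1) 1).filter (fun j => !decide (e < i*j))).map
          (fun j => i*j)).map (fun m => (m, (2:Int)))) from by rw [List.map_map]; rfl]
    rw [sumAt_map_pair]
    have hnd : ((((PySem.List.pyRange (i+1) (e+1) 1).filter (fun j => !decide (e < i*j))).map
        (fun j => i*j))).Nodup := by
      apply List.Nodup.map
      · intro a b hab
        exact mul_left_cancel₀ (by omega : i ≠ 0) hab
      · exact (PySem.List.nodup_pyRange_one _ _).filter _
    by_cases hmem : ((n:Nat):Int) ∈ (((PySem.List.pyRange (i+1) (e+1) 1).filter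
        (fun j => !decide (e < i*j))).map (fun j => i*j))
    · rw [List.count_eq_one_of_mem hnd hmem]
      obtain ⟨j, hjf, hje⟩ := List.mem_map.1 hmem
      obtain ⟨hjr, hjp⟩ := List.mem_filter.1 hjf
      obtain ⟨hj1, hj2⟩ := PySem.List.mem_pyRange_one.1 hjr
      have hlt : i*i < ((n:Nat):Int) := by nlinarith
      rw [if_pos ⟨⟨j, hje.symm⟩, hlt⟩]
      norm_num
    · rw [List.count_eq_zero.2 hmem]
      have hcon : ¬(i ∣ ((n:Nat):Int) ∧ i*i < ((n:Nat):Int)) := by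
        rintro ⟨⟨j, hj⟩, hlt⟩
        apply hmem
        have hij : i < j := by nlinarith
        have hjn : j ≤ ((n:Nat):Int) := by nlinarith
        have hne : ((n:Nat):Int) ≤ e := by omega
        rw [List.mem_map]
        refine ⟨j, List.mem_filter.2 ⟨PySem.List.mem_pyRange_one.2 ⟨by omega, by omega⟩, ?_⟩,
          hj.symm⟩
        simp only [Bool.not_eq_true', decide_eq_false_iff_not, not_lt]
        linarith
      rw [if_neg hcon]
      norm_num
  rw [List.map_congr_left hbody]
  rw [PySem.List.sum_map_add_int (PySem.List.pyRange 1 (e+1) 1)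
    (fun i => if i*i = ((n:Nat):Int) then (1:Int) else 0)
    (fun i => 2 * (if i ∣ ((n:Nat):Int) ∧ i*i < ((n:Nat):Int) then (1:Int) else 0))]
  have he1 : (e + 1 - 1).toNat = e.toNat := by omega
  congr 1
  · rw [PySem.List.pyRange_one, he1, List.map_map]
    exact sum_ite_range_card e.toNat (fun x => x*x = ((n:Nat):Int)) (fun i => i * i = n)
      (by
        intro d hd1 hdN
        constructor
        · intro h
          have h' : (d:Int) * (d:Int) = ((n:Nat):Int) := h
          exact_mod_cast h'
        · intro h
          show (d:Int) * (d:Int) = ((n:Nat):Int)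
          exact_mod_cast h)
  · rw [List.sum_map_mul_left]
    congr 1
    rw [PySem.List.pyRange_one, he1, List.map_map]
    exact sum_ite_range_card e.toNat
      (fun x => x ∣ ((n:Nat):Int) ∧ x*x < ((n:Nat):Int)) (fun i => i ∣ n ∧ i * i < n)
      (by
        intro d hd1 hdN
        constructor
        · rintro ⟨h1', h2'⟩
          refine ⟨Int.natCast_dvd_natCast.mp h1', ?_⟩
          exact_mod_cast h2'
        · rintro ⟨h1', h2'⟩
          refine ⟨Int.natCast_dvd_natCast.mpr h1', ?_⟩
          exact_mod_cast h2')

lemma dp_eq (e : Int) (he : 0 ≤ e) :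
    (pairsA e).foldl incr (PySem.List.pyRepeat [(0:Int)] (e+1))
      = (pairsB e).foldl incr (PySem.List.pyRepeat [(0:Int)] (e+1)) := by
  have hlen0 : (PySem.List.pyRepeat [(0:Int)] (e+1)).length = e.toNat + 1 := by
    rw [PySem.List.pyRepeat_singleton, List.length_replicate]; omega
  have hbA : ∀ p ∈ pairsA e, 0 ≤ p.1 ∧ p.1 < ((PySem.List.pyRepeat [(0:Int)] (e+1)).length : Int) := by
    intro p hp
    obtain ⟨h1, h2⟩ := pairsA_bounds e p hp
    rw [hlen0]; omega
  have hbB : ∀ p ∈ pairsB e, 0 ≤ p.1 ∧ p.1 < ((PySem.List.pyRepeat [(0:Int)] (e+1)).length : Int) := by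
    intro p hp
    obtain ⟨h1, h2⟩ := pairsB_bounds e p hp
    rw [hlen0]; omega
  apply List.ext_getElem
  · rw [length_foldl_incr, length_foldl_incr]
  intro n hn1 hn2
  rw [length_foldl_incr, hlen0] at hn1
  have hgA := getD_foldl_incr (pairsA e) _ hbA n
  have hgB := getD_foldl_incr (pairsB e) _ hbB n
  rw [← List.getD_eq_getElem _ 0, ← List.getD_eq_getElem _ 0, hgA, hgB]
  congr 1
  rcases Nat.eq_zero_or_pos n with hn0 | hpos
  · subst hn0
    rw [sumAt_zero_of_pos _ (fun p hp => (pairsA_bounds e p hp).1),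
      sumAt_zero_of_pos _ (fun p hp => (pairsB_bounds e p hp).1)]
  · have hnN : n ≤ e.toNat := by omega
    rw [sumAt_A e he n hnN, sumAt_B e he n hnN]
    have hfilter : (Finset.Icc 1 e.toNat).filter (fun d => d ∣ n ∧ 1 ≤ n)
        = (Finset.Icc 1 e.toNat).filter (fun d => d ∣ n) := by
      apply Finset.filter_congr
      intro d _
      constructor
      · rintro ⟨hd, -⟩; exact hd
      · intro hd; exact ⟨hd, hpos⟩
    rw [hfilter]
    rw [show (((Finset.Icc 1 e.toNat).filter (fun d => d ∣ n)).card : Int)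
        = ((((Finset.Icc 1 e.toNat).filter (fun i => i * i = n)).card
          + 2 * ((Finset.Icc 1 e.toNat).filter (fun i => i ∣ n ∧ i * i < n)).card : Nat) : Int)
      from by rw [key_card e.toNat n hpos hnN]]
    push_cast
    ring

-- the suffix-argmax value after k backward steps (k = e - 1 - i)
def gfun (dp : List Int) (e : Int) : Nat → Int
  | 0 => e
  | (k+1) =>
    if PySem.List.pyGetD dp (e-1-k) 0 ≥ PySem.List.pyGetD dp (gfun dp e k) 0
    then e-1-k else gfun dp e k

lemma gfun_succ (dp : List Int) (e : Int) (k : Nat) :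
    gfun dp e (k+1)
      = if PySem.List.pyGetD dp (e-1-(k:Int)) 0 ≥ PySem.List.pyGetD dp (gfun dp e k) 0
        then e-1-(k:Int) else gfun dp e k := rfl

lemma step_write (dp : List Int) (e : Int) (he : 0 ≤ e) (t : Nat) (htN : t < e.toNat) :
    PySem.List.pySetD ((List.range (e.toNat+1)).map
        (fun j : Nat => if e.toNat - t ≤ j then gfun dp e (e.toNat - j) else 0))
        (e - 1 - (t:Int)) (gfun dp e (t+1))
      = (List.range (e.toNat+1)).map
        (fun j : Nat => if e.toNat - (t+1) ≤ j then gfun dp e (e.toNat - j) else 0) := by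
  rw [PySem.List.pySetD_of_nonneg _ _ (by omega)]
  have hidx2 : (e - 1 - (t:Int)).toNat = e.toNat - 1 - t := by omega
  rw [hidx2]
  apply List.ext_getElem
  · simp
  intro j hj1 hj2
  simp only [List.length_set, List.length_map, List.length_range] at hj1
  by_cases hjw : j = e.toNat - 1 - t
  · subst hjw
    rw [List.getElem_set_self (by simp; omega)]
    rw [List.getElem_map, List.getElem_range]
    rw [if_pos (by omega)]
    congr 1
    omega
  · rw [List.getElem_set_ne (fun hcon => hjw hcon.symm)]
    rw [List.getElem_map, List.getElem_range, List.getElem_map, List.getElem_range]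
    by_cases hc : e.toNat - t ≤ j
    · rw [if_pos hc, if_pos (by omega)]
    · rw [if_neg hc, if_neg (by omega)]

lemma phase2A_inv (dp : List Int) (e : Int) (he : 0 ≤ e) (t : Nat) (ht : t ≤ e.toNat) :
    ((List.range t).map (fun k : Nat => e - 1 - (k:Int))).foldl (phase2StepA dp)
      (PySem.List.pySetD (PySem.List.pyRepeat [(0:Int)] (e+1)) e e)
    = (List.range (e.toNat+1)).map
        (fun j : Nat => if e.toNat - t ≤ j then gfun dp e (e.toNat - j) else 0) := by
  induction t with
  | zero =>
    rw [List.range_zero, List.map_nil, List.foldl_nil]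
    rw [PySem.List.pyRepeat_singleton, PySem.List.pySetD_of_nonneg _ _ he]
    rw [show (e+1).toNat = e.toNat + 1 from by omega]
    apply List.ext_getElem
    · simp
    intro j hj1 hj2
    simp only [List.length_set, List.length_replicate] at hj1
    rw [List.getElem_map, List.getElem_range]
    by_cases hje : j = e.toNat
    · have hje' : e.toNat = j := hje.symm
      subst hje
      rw [List.getElem_set_self (by simp only [List.length_set, List.length_replicate]; omega)]
      rw [if_pos (by omega)]
      rw [show e.toNat - e.toNat = 0 from by omega]
      rfl
    · rw [List.getElem_set_ne (fun hcon => hje hcon.symm), List.getElem_replicate]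
      rw [if_neg (by omega)]
  | succ t ih =>
    have ht' : t ≤ e.toNat := by omega
    have htN : t < e.toNat := by omega
    rw [List.range_succ, List.map_append, List.foldl_append, ih ht']
    simp only [List.map_cons, List.map_nil, List.foldl_cons, List.foldl_nil]
    rw [phase2StepA]
    have hread : PySem.List.pyGetD ((List.range (e.toNat+1)).map
        (fun j : Nat => if e.toNat - t ≤ j then gfun dp e (e.toNat - j) else 0))
          (e - 1 - (t:Int) + 1) 0 = gfun dp e t := by
      rw [show e - 1 - (t:Int) + 1 = (((e.toNat - t : Nat) : Nat) : Int) from by omega]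
      rw [PySem.List.pyGetD_natCast]
      rw [List.getD_eq_getElem _ _ (by simp only [List.length_map, List.length_range]; omega)]
      rw [List.getElem_map, List.getElem_range]
      rw [if_pos (le_refl _)]
      congr 1
      omega
    rw [hread]
    have hstep := step_write dp e he t htN
    by_cases hcmp : PySem.List.pyGetD dp (e - 1 - (t:Int)) 0 ≥ PySem.List.pyGetD dp (gfun dp e t) 0
    · rw [if_pos hcmp]
      rw [show gfun dp e (t+1) = e - 1 - (t:Int) from by rw [gfun, if_pos hcmp]] at hstep
      exact hstep
    · rw [if_neg hcmp]
      rw [show gfun dp e (t+1) = gfun dp e t from by rw [gfun, if_neg hcmp]] at hstep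
      exact hstep

lemma phase2B_inv (dp : List Int) (e : Int) (t : Nat) :
    ((List.range t).map (fun k : Nat => e - 1 - (k:Int))).foldl (sufStepB dp) (e, [e])
    = (gfun dp e t, (List.range (t+1)).map (fun k => gfun dp e k)) := by
  induction t with
  | zero => simp [gfun, List.range_succ]
  | succ t ih =>
    rw [List.range_succ, List.map_append, List.foldl_append, ih]
    simp only [List.map_cons, List.map_nil, List.foldl_cons, List.foldl_nil]
    rw [sufStepB, Prod.mk.injEq]
    dsimp only
    refine ⟨?_, ?_⟩
    · rw [gfun_succ]
    · rw [List.range_succ (n := t+1), List.map_append, List.map_cons, List.map_nil, gfun_succ]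

lemma reverse_map_range (N : Nat) (f : Nat → Int) :
    ((List.range (N+1)).map f).reverse = (List.range (N+1)).map (fun j => f (N - j)) := by
  apply List.ext_getElem
  · simp
  intro j h1 h2
  rw [List.getElem_reverse]
  simp only [List.getElem_map, List.getElem_range]
  simp only [List.length_reverse, List.length_map, List.length_range] at h1
  congr 1
  simp only [List.length_map, List.length_range]
  omega

lemma phase2A_eq (dp : List Int) (e : Int) (he : 0 ≤ e) :
    (PySem.List.pyRange (e-1) (-1) (-1)).foldl (phase2StepA dp)
      (PySem.List.pySetD (PySem.List.pyRepeat [(0:Int)] (e+1)) e e)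
    = (List.range (e.toNat+1)).map (fun j => gfun dp e (e.toNat - j)) := by
  rw [PySem.List.pyRange_neg_one]
  rw [show (e - 1 - (-1)).toNat = e.toNat from by omega]
  rw [phase2A_inv dp e he e.toNat (le_refl _)]
  apply List.map_congr_left
  intro j hj
  rw [if_pos (by omega)]

lemma phase2B_eq (dp : List Int) (e : Int) (he : 0 ≤ e) :
    ((PySem.List.pyRange (e-1) (-1) (-1)).foldl (sufStepB dp) (e, [e])).2.reverse
    = (List.range (e.toNat+1)).map (fun j => gfun dp e (e.toNat - j)) := by
  rw [PySem.List.pyRange_neg_one]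
  rw [show (e - 1 - (-1)).toNat = e.toNat from by omega]
  rw [phase2B_inv dp e e.toNat]
  exact reverse_map_range e.toNat (gfun dp e)

-- ===== VERDICT (by name: the statement is the Claim_ definition above) =====
theorem solution_spec : Claim_equal_solution := by
  unfold Claim_equal_solution
  intro e starts _dom pre
  obtain ⟨he, -⟩ := pre
  unfold Spec_solution
  show solution e starts = solution_alt e starts
  simp only [solution, solution_alt]
  rw [phase1A_eq, phase1B_eq, dp_eq e he, phase2A_eq _ e he, phase2B_eq _ e he,
    PySem.List.foldl_append_singleton_eq_map, List.nil_append]
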